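-- pv_equiv track=rewrite | github.com/harshilkhara/LeetCode_qts | answerQueries.py | answerQueries1
-- ===== SOURCE A (Python) =====
-- import bisect
--
-- def answerQueries1(nums,queries): # TC O((n+m) log n) // SC O(n)
-- 	nums.sort()
-- 	#prefix sum- running sum
-- 	for i in range(1,len(nums)):
-- 		nums[i]+=nums[i-1]
--
-- 	ans=[]
-- 	for i in range(len(queries)):
-- 		index=bisect.bisect_right(nums,queries[i])
-- 		ans.append(index)
--
-- 	return ans
-- ===== SOURCE B (Python) =====
-- def answerQueries1(nums, queries):
--     # Same in-place mutation of nums as A (sort + in-place prefix sums).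
--     # Instead of one independent binary search per query, all query indices are
--     # pushed together down the shared binary-search tree: each node (lo, hi)
--     # splits its batch of queries on the comparison with nums[(lo+hi)//2].
--     nums.sort()
--     for i in range(1, len(nums)):
--         nums[i] += nums[i - 1]
--     ans = [0] * len(queries)
--
--     def go(lo, hi, idxs):
--         if not idxs:
--             return
--         if lo >= hi:
--             for i in idxs:
--                 ans[i] = lo
--             return
--         mid = (lo + hi) // 2
--         go(lo, mid, [i for i in idxs if queries[i] < nums[mid]])
--         go(mid + 1, hi, [i for i in idxs if not queries[i] < nums[mid]])
--
--     go(0, len(nums), list(range(len(queries))))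
--     return ans
-- ===== Notes on version B (the rewrite author's own statement) =====
-- stated objective: alternative
-- what changed: The per-query calls to bisect_right are replaced by a single recursive traversal of the shared binary-search tree that carries the whole batch of query indices, partitioning the batch at each node on the comparison with the midpoint prefix sum and scattering the answers back by original index.
import Mathlib
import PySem

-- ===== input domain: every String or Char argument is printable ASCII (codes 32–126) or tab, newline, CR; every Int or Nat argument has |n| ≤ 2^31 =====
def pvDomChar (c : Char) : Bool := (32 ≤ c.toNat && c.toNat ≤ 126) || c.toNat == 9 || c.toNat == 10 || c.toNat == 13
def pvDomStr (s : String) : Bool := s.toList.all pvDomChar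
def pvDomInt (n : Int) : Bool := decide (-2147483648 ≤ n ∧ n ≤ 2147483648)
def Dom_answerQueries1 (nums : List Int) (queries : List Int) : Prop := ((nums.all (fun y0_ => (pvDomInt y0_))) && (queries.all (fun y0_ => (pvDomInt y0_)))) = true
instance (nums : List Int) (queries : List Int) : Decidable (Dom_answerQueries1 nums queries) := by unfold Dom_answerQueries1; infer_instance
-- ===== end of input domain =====

-- B answers all queries with ONE recursive traversal of the shared binary-search tree,
-- partitioning the batch of query indices at each node, instead of one independent
-- bisect_right per query (objective: alternative). Both A and B mutate the Python
-- argument `nums` in place identically (sort + in-place prefix sums); the equivalence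
-- proved here is about the return value.

-- ===== PORT A =====
-- the in-place prefix-sum loop `for i in range(1,len(nums)): nums[i] += nums[i-1]`,
-- transcribed as the same running sums computed in the same order (identical lines in Source A and Source B)
def pvPrefixRun : Int → List Int → List Int
  | _, [] => []
  | s, a :: t => (s + a) :: pvPrefixRun (s + a) t

def pvPrefix : List Int → List Int
  | [] => []
  | a :: t => a :: pvPrefixRun a t

-- bisect.bisect_right is the library call PySem.List.bisectRight;
-- queries[i] with i drawn from range(len(queries)) is always in range, so getD is exact
def answerQueries1 (nums : List Int) (queries : List Int) : List Int :=
  let s := PySem.List.sorted nums (fun x => x) false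
  let p := pvPrefix s
  (List.range queries.length).foldl
    (fun ans i => ans ++ [((PySem.List.bisectRight p (queries.getD i 0) : Nat) : Int)]) []

-- ===== PORT B =====
-- the recursive helper `go(lo, hi, idxs)` of Source B; nums[mid] with lo ≤ mid < hi ≤ len(nums)
-- is always in range, so getD is exact
def pvGo (p : List Int) (queries : List Int) (lo hi : Nat) (idxs : List Nat) (ans : List Int) :
    List Int :=
  if idxs = [] then ans
  else if lo ≥ hi then idxs.foldl (fun a i => a.set i ((lo : Nat) : Int)) ans
  else
    let mid := (lo + hi) / 2
    let ansL := pvGo p queries lo mid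
      (idxs.filter (fun i => decide (queries.getD i 0 < p.getD mid 0))) ans
    pvGo p queries (mid + 1) hi
      (idxs.filter (fun i => ¬ decide (queries.getD i 0 < p.getD mid 0))) ansL
termination_by hi - lo
decreasing_by all_goals omega

def answerQueries1_alt (nums : List Int) (queries : List Int) : List Int :=
  let s := PySem.List.sorted nums (fun x => x) false
  let p := pvPrefix s
  pvGo p queries 0 p.length (List.range queries.length) (List.replicate queries.length 0)

-- ===== PRECONDITION & SPEC =====
def Spec_answerQueries1 (nums : List Int) (queries : List Int) (out : List Int) : Prop := out = answerQueries1_alt nums queries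
instance (nums : List Int) (queries : List Int) (out : List Int) : Decidable (Spec_answerQueries1 nums queries out) := by unfold Spec_answerQueries1; infer_instance

-- ===== CLAIM (what is proved, stated in full; the proofs are below) =====
def Claim_equal_answerQueries1 : Prop := ∀ (nums : List Int) (queries : List Int), Dom_answerQueries1 nums queries → Spec_answerQueries1 nums queries (answerQueries1 nums queries)

-- ===== LEMMAS AND PROOFS =====

-- the result of a single binary search on the interval [lo, hi), as a recursion on hi - lo
def pvSearch (p : List Int) (q : Int) (lo hi : Nat) : Nat :=
  if lo < hi then
    let mid := (lo + hi) / 2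
    if q < p.getD mid 0 then pvSearch p q lo mid else pvSearch p q (mid + 1) hi
  else lo
termination_by hi - lo
decreasing_by all_goals omega

theorem bisectRightLoop_eq_pvSearch (p : List Int) (q : Int) (fuel lo hi : Nat)
    (hhi : hi ≤ p.length) (hfuel : hi - lo ≤ fuel) :
    PySem.List.bisectRightLoop p q fuel lo hi = pvSearch p q lo hi := by
  induction fuel generalizing lo hi with
  | zero =>
      have hnlt : ¬ lo < hi := by omega
      rw [pvSearch, if_neg hnlt]
      rfl
  | succ fuel ih =>
      rw [PySem.List.bisectRightLoop, pvSearch]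
      by_cases hlt : lo < hi
      · rw [if_pos hlt, if_pos hlt]
        have hmid : (lo + hi) / 2 < p.length := by omega
        rw [List.getElem?_eq_getElem hmid]
        have hred : (match some (p[(lo + hi) / 2]) with
            | some y => if q < y then PySem.List.bisectRightLoop p q fuel lo ((lo + hi) / 2)
                        else PySem.List.bisectRightLoop p q fuel ((lo + hi) / 2 + 1) hi
            | none => lo) =
            if q < p[(lo + hi) / 2] then PySem.List.bisectRightLoop p q fuel lo ((lo + hi) / 2)
            else PySem.List.bisectRightLoop p q fuel ((lo + hi) / 2 + 1) hi := rfl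
        refine Eq.trans hred ?_
        show _ = if q < p.getD ((lo + hi) / 2) 0 then pvSearch p q lo ((lo + hi) / 2)
          else pvSearch p q ((lo + hi) / 2 + 1) hi
        have hgd : p.getD ((lo + hi) / 2) 0 = p[(lo + hi) / 2] := List.getD_eq_getElem _ _ hmid
        rw [hgd]
        by_cases hc : q < p[(lo + hi) / 2]
        · rw [if_pos hc, if_pos hc]
          exact ih lo ((lo + hi) / 2) (by omega) (by omega)
        · rw [if_neg hc, if_neg hc]
          exact ih ((lo + hi) / 2 + 1) hi hhi (by omega)
      · rw [if_neg hlt, if_neg hlt]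

theorem bisectRight_eq_pvSearch (p : List Int) (q : Int) :
    PySem.List.bisectRight p q = pvSearch p q 0 p.length :=
  bisectRightLoop_eq_pvSearch p q p.length 0 p.length (le_refl _) (by omega)

theorem foldl_set_length (f : Nat → Int) (order : List Nat) (ans : List Int) :
    (order.foldl (fun a i => a.set i (f i)) ans).length = ans.length := by
  induction order generalizing ans with
  | nil => rfl
  | cons i rest ih => rw [List.foldl_cons, ih]; simp

theorem foldl_set_getElem? (f : Nat → Int) (order : List Nat) (ans : List Int) (j : Nat)
    (hnd : order.Nodup) :
    (order.foldl (fun a i => a.set i (f i)) ans)[j]? =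
      if j ∈ order ∧ j < ans.length then some (f j) else ans[j]? := by
  induction order generalizing ans with
  | nil => simp
  | cons i rest ih =>
      rw [List.foldl_cons, ih _ (List.Nodup.of_cons hnd)]
      have hi : i ∉ rest := (List.nodup_cons.1 hnd).1
      by_cases hjr : j ∈ rest
      · have hji : j ≠ i := fun h => hi (h ▸ hjr)
        by_cases hjl : j < ans.length
        · simp [hjr, hjl]
        · simp [hjr, hjl]
      · by_cases hji : j = i
        · subst hji
          by_cases hjl : j < ans.length
          · simp [hjr, hjl]
          · simp [hjr, hjl]
        · simp [hjr, hji, (Ne.symm hji : i ≠ j)]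

theorem pvGo_length (p : List Int) (queries : List Int) (lo hi : Nat) (idxs : List Nat)
    (ans : List Int) : (pvGo p queries lo hi idxs ans).length = ans.length := by
  rw [pvGo]
  by_cases h0 : idxs = []
  · simp [h0]
  · rw [if_neg h0]
    by_cases h1 : lo ≥ hi
    · rw [if_pos h1]
      exact foldl_set_length _ _ _
    · rw [if_neg h1]
      rw [pvGo_length, pvGo_length]
termination_by hi - lo
decreasing_by all_goals omega

theorem pvGo_getElem? (p : List Int) (queries : List Int) (lo hi : Nat) (idxs : List Nat)
    (ans : List Int) (j : Nat) (hnd : idxs.Nodup) :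
    (pvGo p queries lo hi idxs ans)[j]? =
      if j ∈ idxs ∧ j < ans.length then
        some ((pvSearch p (queries.getD j 0) lo hi : Nat) : Int)
      else ans[j]? := by
  rw [pvGo]
  by_cases h0 : idxs = []
  · simp [h0]
  · rw [if_neg h0]
    by_cases h1 : lo ≥ hi
    · rw [if_pos h1]
      rw [foldl_set_getElem? _ _ _ _ hnd]
      rw [pvSearch, if_neg (by omega : ¬ lo < hi)]
    · rw [if_neg h1]
      have hndL := List.Nodup.filter
        (fun i => decide (queries.getD i 0 < p.getD ((lo + hi) / 2) 0)) hnd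
      have hndR := List.Nodup.filter
        (fun i => ¬ decide (queries.getD i 0 < p.getD ((lo + hi) / 2) 0)) hnd
      rw [pvGo_getElem? _ _ _ _ _ _ _ hndR, pvGo_getElem? _ _ _ _ _ _ _ hndL, pvGo_length]
      have hS : pvSearch p (queries.getD j 0) lo hi =
          (if queries.getD j 0 < p.getD ((lo + hi) / 2) 0 then
            pvSearch p (queries.getD j 0) lo ((lo + hi) / 2)
          else pvSearch p (queries.getD j 0) ((lo + hi) / 2 + 1) hi) := by
        rw [pvSearch, if_pos (by omega : lo < hi)]
      simp only [List.getD_eq_getElem?_getD] at hS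
      by_cases hc : queries[j]?.getD 0 < p[(lo + hi) / 2]?.getD 0
      · simp [List.mem_filter, hS, hc, not_le.mpr hc]
      · simp [List.mem_filter, hS, hc, not_lt.1 hc]
termination_by hi - lo
decreasing_by all_goals omega

-- ===== VERDICT (by name: the statement is the Claim_ definition above) =====
theorem answerQueries1_spec : Claim_equal_answerQueries1 := by
  intro nums queries _hdom
  unfold Spec_answerQueries1
  show (List.range queries.length).foldl _ [] = pvGo _ _ _ _ _ _
  rw [PySem.List.foldl_append_singleton_eq_map, List.nil_append]
  apply List.ext_getElem?
  intro j
  rw [pvGo_getElem? _ _ _ _ _ _ _ List.nodup_range]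
  by_cases hj : j < queries.length
  · rw [if_pos ⟨List.mem_range.2 hj, by simpa using hj⟩]
    rw [List.getElem?_map, List.getElem?_range hj]
    simp [bisectRight_eq_pvSearch]
  · rw [if_neg (by simp [hj])]
    simp [hj]
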